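-- pv_equiv track=rewrite | github.com/ini/numthy | solve.py | problem_17
-- ===== SOURCE A (Python) =====
-- def problem_17(N=1000):
--     """
--     Find the number of letters used to write out the numbers 1 to N in words.
--     """
--     digits = {
--         0: '', 1: 'one', 2: 'two', 3: 'three', 4: 'four',
--         5: 'five', 6: 'six', 7: 'seven', 8: 'eight', 9: 'nine',
--     }
--     teens = {
--         10: 'ten', 11: 'eleven', 12: 'twelve', 13: 'thirteen', 14: 'fourteen',
--         15: 'fifteen', 16: 'sixteen', 17: 'seventeen', 18: 'eighteen', 19: 'nineteen',
--     }
--     tens = {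
--         2: 'twenty', 3: 'thirty', 4: 'forty', 5: 'fifty',
--         6: 'sixty', 7: 'seventy', 8: 'eighty', 9: 'ninety',
--     }
--
--     def int_to_words(n: int) -> str:
--         if n in digits:
--             return digits[n]
--         elif n in teens:
--             return teens[n]
--         elif n < 100:
--             return tens[n // 10] + digits[n % 10]
--         elif n < 1000:
--             return digits[n // 100] + 'hundred' + (
--                 'and' + int_to_words(n % 100) if 0 < n % 100 else '')
--         elif n < 1000000:
--             return int_to_words(n // 1000) + 'thousand' + (
--                 'and' if 0 < n % 1000 < 100 else '') + int_to_words(n % 1000)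
--
--     return sum(len(int_to_words(n)) for n in range(1, N + 1))
-- ===== SOURCE B (Python) =====
-- def problem_17(N=1000):
--     """
--     Find the number of letters used to write out the numbers 1 to N in words.
--     Block aggregation: letter counts for 0..999 are tabulated arithmetically once
--     (no strings built), then whole thousands-blocks are summed in closed form.
--     """
--     d = (0, 3, 3, 5, 4, 4, 3, 5, 5, 4)          # '', one, two, ...
--     te = (3, 6, 6, 8, 8, 7, 7, 9, 8, 8)         # ten .. nineteen
--     ty = (0, 0, 6, 6, 5, 5, 5, 7, 6, 6)         # twenty .. ninety
--
--     def small(n):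
--         # letters used for 0 <= n <= 999
--         if n < 10:
--             return d[n]
--         if n < 20:
--             return te[n - 10]
--         if n < 100:
--             return ty[n // 10] + d[n % 10]
--         return d[n // 100] + 7 + (3 + small(n % 100) if n % 100 else 0)
--
--     # prefix sums: P[j] = small(0) + ... + small(j)
--     P = [0]
--     for j in range(1, 1000):
--         P.append(P[-1] + small(j))
--
--     if N <= 0:
--         return 0
--     if N < 1000:
--         return P[N]
--     q, r = divmod(N, 1000)
--     total = P[999]                                        # numbers 1..999
--     total += 1000 * P[q - 1] + (q - 1) * (8297 + P[999])  # full blocks k = 1..q-1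
--     total += (r + 1) * (small(q) + 8) + 3 * min(r, 99) + P[r]  # partial block k = q
--     return total
-- ===== Notes on version B (the rewrite author's own statement) =====
-- stated objective: faster
-- what changed: B replaces A's per-number English word construction (building a string for each of the N numbers) by a 1000-entry arithmetic letter-count table with prefix sums plus a closed-form aggregation over whole thousands-blocks, so the work past the fixed table is O(1) instead of O(N).
import Mathlib
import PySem

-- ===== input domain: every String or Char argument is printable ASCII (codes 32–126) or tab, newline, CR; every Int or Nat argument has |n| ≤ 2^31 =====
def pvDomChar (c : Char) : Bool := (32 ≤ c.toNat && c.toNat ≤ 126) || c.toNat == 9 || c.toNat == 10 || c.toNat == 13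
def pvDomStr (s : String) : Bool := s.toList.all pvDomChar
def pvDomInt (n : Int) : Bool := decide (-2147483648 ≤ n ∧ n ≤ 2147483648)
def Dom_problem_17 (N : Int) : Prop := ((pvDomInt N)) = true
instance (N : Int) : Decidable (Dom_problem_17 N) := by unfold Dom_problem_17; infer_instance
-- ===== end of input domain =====

-- B replaces A's per-number word building (O(N) words) by a 1000-entry arithmetic
-- letter-count table plus closed-form block aggregation (O(1) past the table).

-- ===== PORT A =====
def pvDigits : PySem.Dict Int String := PySem.Dict.ofList
  [(0, ""), (1, "one"), (2, "two"), (3, "three"), (4, "four"),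
   (5, "five"), (6, "six"), (7, "seven"), (8, "eight"), (9, "nine")]
def pvTeens : PySem.Dict Int String := PySem.Dict.ofList
  [(10, "ten"), (11, "eleven"), (12, "twelve"), (13, "thirteen"), (14, "fourteen"),
   (15, "fifteen"), (16, "sixteen"), (17, "seventeen"), (18, "eighteen"), (19, "nineteen")]
def pvTens : PySem.Dict Int String := PySem.Dict.ofList
  [(2, "twenty"), (3, "thirty"), (4, "forty"), (5, "fifty"),
   (6, "sixty"), (7, "seventy"), (8, "eighty"), (9, "ninety")]

-- int_to_words; the Nat argument is pure fuel to make the recursion structural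
-- (depth ≤ 3 on every call problem_17 makes).  At the final 'else' Python's
-- function returns None (len(None) raises, excluded by Pre_); "" is a placeholder.
def pvIntToWords : Nat → Int → String
  | 0, _ => ""
  | fuel + 1, n =>
    if pvDigits.contains n then pvDigits.getD n ""
    else if pvTeens.contains n then pvTeens.getD n ""
    else if n < 100 then pvTens.getD (PySem.Int.floordiv n 10) "" ++ pvDigits.getD (PySem.Int.mod n 10) ""
    else if n < 1000 then
      pvDigits.getD (PySem.Int.floordiv n 100) "" ++ "hundred" ++
        (if 0 < PySem.Int.mod n 100 then "and" ++ pvIntToWords fuel (PySem.Int.mod n 100) else "")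
    else if n < 1000000 then
      pvIntToWords fuel (PySem.Int.floordiv n 1000) ++ "thousand" ++
        (if 0 < PySem.Int.mod n 1000 ∧ PySem.Int.mod n 1000 < 100 then "and" else "") ++
        pvIntToWords fuel (PySem.Int.mod n 1000)
    else ""

def problem_17 (N : Int) : Int :=
  (PySem.List.pyRange 1 (N + 1) 1).foldl (fun acc n => acc + PySem.Str.len (pvIntToWords 3 n)) 0

-- ===== PORT B =====
def pvD : List Int := [0, 3, 3, 5, 4, 4, 3, 5, 5, 4]
def pvTe : List Int := [3, 6, 6, 8, 8, 7, 7, 9, 8, 8]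
def pvTy : List Int := [0, 0, 6, 6, 5, 5, 5, 7, 6, 6]

-- Source B's small; the Nat argument is pure fuel (depth ≤ 2 on every call B makes)
def pvSmall : Nat → Int → Int
  | 0, _ => 0
  | fuel + 1, n =>
    if n < 10 then PySem.List.pyGetD pvD n 0
    else if n < 20 then PySem.List.pyGetD pvTe (n - 10) 0
    else if n < 100 then PySem.List.pyGetD pvTy (PySem.Int.floordiv n 10) 0 + PySem.List.pyGetD pvD (PySem.Int.mod n 10) 0
    else PySem.List.pyGetD pvD (PySem.Int.floordiv n 100) 0 + 7 +
      (if PySem.Int.mod n 100 ≠ 0 then 3 + pvSmall fuel (PySem.Int.mod n 100) else 0)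

def problem_17_alt (N : Int) : Int :=
  let P := (PySem.List.pyRange 1 1000 1).foldl
      (fun P j => P ++ [PySem.List.pyGetD P (-1) 0 + pvSmall 2 j]) [0]
  if N ≤ 0 then 0
  else if N < 1000 then PySem.List.pyGetD P N 0
  else
    let q := PySem.Int.floordiv N 1000
    let r := PySem.Int.mod N 1000
    let total := PySem.List.pyGetD P 999 0
    let total := total + (1000 * PySem.List.pyGetD P (q - 1) 0 + (q - 1) * (8297 + PySem.List.pyGetD P 999 0))
    total + ((r + 1) * (pvSmall 2 q + 8) + 3 * min r 99 + PySem.List.pyGetD P r 0)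

-- ===== PRECONDITION & SPEC =====
-- A's int_to_words returns None for n ≥ 10^6, so for N ≥ 10^6 A raises
-- TypeError at len(None): exactly those inputs are excluded.
def Pre_problem_17 (N : Int) : Prop := N < 1000000
instance (N : Int) : Decidable (Pre_problem_17 N) := by unfold Pre_problem_17; infer_instance
def pvWitness_problem_17 : Int := 2525

def Spec_problem_17 (N : Int) (out : Int) : Prop := out = problem_17_alt N
instance (N : Int) (out : Int) : Decidable (Spec_problem_17 N out) := by unfold Spec_problem_17; infer_instance

-- ===== CLAIM (what is proved, stated in full; the proofs are below) =====
def Claim_equal_problem_17 : Prop := ∀ (N : Int), Dom_problem_17 N → Pre_problem_17 N → Spec_problem_17 N (problem_17 N)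

-- ===== LEMMAS AND PROOFS =====

theorem pvWords_succ (f : Nat) (n : Int) : pvIntToWords (f + 1) n =
    (if pvDigits.contains n then pvDigits.getD n ""
    else if pvTeens.contains n then pvTeens.getD n ""
    else if n < 100 then pvTens.getD (PySem.Int.floordiv n 10) "" ++ pvDigits.getD (PySem.Int.mod n 10) ""
    else if n < 1000 then
      pvDigits.getD (PySem.Int.floordiv n 100) "" ++ "hundred" ++
        (if 0 < PySem.Int.mod n 100 then "and" ++ pvIntToWords f (PySem.Int.mod n 100) else "")
    else if n < 1000000 then
      pvIntToWords f (PySem.Int.floordiv n 1000) ++ "thousand" ++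
        (if 0 < PySem.Int.mod n 1000 ∧ PySem.Int.mod n 1000 < 100 then "and" else "") ++
        pvIntToWords f (PySem.Int.mod n 1000)
    else "") := rfl

theorem pvSmall_succ (f : Nat) (n : Int) : pvSmall (f + 1) n =
    (if n < 10 then PySem.List.pyGetD pvD n 0
    else if n < 20 then PySem.List.pyGetD pvTe (n - 10) 0
    else if n < 100 then PySem.List.pyGetD pvTy (PySem.Int.floordiv n 10) 0 + PySem.List.pyGetD pvD (PySem.Int.mod n 10) 0
    else PySem.List.pyGetD pvD (PySem.Int.floordiv n 100) 0 + 7 +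
      (if PySem.Int.mod n 100 ≠ 0 then 3 + pvSmall f (PySem.Int.mod n 100) else 0)) := rfl

theorem pvSmall_fuel1 (f : Nat) (n : Int) (h : n < 100) : pvSmall (f + 1) n = pvSmall 1 n := by
  simp only [pvSmall]
  split_ifs <;> first | rfl | omega

theorem pvWords_fuel1 (f : Nat) (n : Int) (h : n < 100) : pvIntToWords (f + 1) n = pvIntToWords 1 n := by
  simp only [pvIntToWords]
  split_ifs <;> first | rfl | omega

theorem pvWords_fuel2 (f : Nat) (n : Int) (h : n < 1000) : pvIntToWords (f + 2) n = pvIntToWords 2 n := by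
  by_cases h100 : n < 100
  · rw [show f + 2 = (f + 1) + 1 from rfl, pvWords_fuel1 (f + 1) n h100, ← pvWords_fuel1 1 n h100]
  · have hm : PySem.Int.mod n 100 < 100 := PySem.Int.mod_lt n (by norm_num)
    simp only [pvIntToWords]
    split_ifs <;> first | rfl | omega | rw [pvWords_fuel1 (f + 1) _ hm, ← pvWords_fuel1 1 _ hm]

theorem pvContains_digits (n : Int) (h : 100 ≤ n) : pvDigits.contains n = false := by
  have hd : pvDigits = PySem.Dict.mk [(0, ""), (1, "one"), (2, "two"), (3, "three"), (4, "four"),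
      (5, "five"), (6, "six"), (7, "seven"), (8, "eight"), (9, "nine")] := by decide
  rw [hd, PySem.Dict.contains_mk]; simp; omega

theorem pvContains_teens (n : Int) (h : 100 ≤ n) : pvTeens.contains n = false := by
  have hd : pvTeens = PySem.Dict.mk [(10, "ten"), (11, "eleven"), (12, "twelve"), (13, "thirteen"),
      (14, "fourteen"), (15, "fifteen"), (16, "sixteen"), (17, "seventeen"), (18, "eighteen"),
      (19, "nineteen")] := by decide
  rw [hd, PySem.Dict.contains_mk]; simp; omega

theorem pvTable100 : ((List.range 100).all
    (fun j => PySem.Str.len (pvIntToWords 2 (j : Int)) == pvSmall 2 (j : Int))) = true := by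
  decide

theorem pvLen100 (n : Int) (h0 : 0 ≤ n) (h : n < 100) :
    PySem.Str.len (pvIntToWords 2 n) = pvSmall 2 n := by
  have hmem : n.toNat ∈ List.range 100 := by rw [List.mem_range]; omega
  have := List.all_eq_true.mp pvTable100 _ hmem
  simp only [beq_iff_eq] at this
  have hn : ((n.toNat : Nat) : Int) = n := by omega
  rwa [hn] at this

theorem pvLenDigit (n : Int) (h0 : 0 ≤ n) (h : n < 10) :
    PySem.Str.len (pvDigits.getD n "") = PySem.List.pyGetD pvD n 0 := by
  interval_cases n <;> decide

theorem pvLen1000 (n : Int) (h0 : 0 ≤ n) (h : n < 1000) :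
    PySem.Str.len (pvIntToWords 2 n) = pvSmall 2 n := by
  by_cases h100 : n < 100
  · exact pvLen100 n h0 h100
  · have hmn : 0 ≤ PySem.Int.mod n 100 := PySem.Int.mod_nonneg n (by norm_num)
    have hml : PySem.Int.mod n 100 < 100 := PySem.Int.mod_lt n (by norm_num)
    have hq1 : 1 ≤ PySem.Int.floordiv n 100 := (PySem.Int.le_floordiv_iff_mul_le (by norm_num)).mpr (by omega)
    have hq9 : PySem.Int.floordiv n 100 < 10 := (PySem.Int.floordiv_lt_iff_lt_mul (by norm_num)).mpr (by omega)
    rw [show (2 : Nat) = 1 + 1 from rfl, pvWords_succ, pvSmall_succ]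
    rw [pvContains_digits n (by omega), pvContains_teens n (by omega)]
    simp only [Bool.false_eq_true, if_false]
    rw [if_neg (by omega : ¬ n < 100), if_pos h, if_neg (by omega : ¬ n < 10),
        if_neg (by omega : ¬ n < 20), if_neg (by omega : ¬ n < 100)]
    rw [PySem.Str.len_append, PySem.Str.len_append]
    rw [pvLenDigit _ (by omega) hq9]
    by_cases hz : 0 < PySem.Int.mod n 100
    · rw [if_pos hz, if_pos (by omega : PySem.Int.mod n 100 ≠ 0)]
      rw [PySem.Str.len_append]
      have := pvLen100 (PySem.Int.mod n 100) hmn hml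
      rw [pvWords_fuel1 1 _ hml] at this
      rw [this, pvSmall_fuel1 1 _ hml]
      have h7 : PySem.Str.len "hundred" = 7 := by decide
      have h3 : PySem.Str.len "and" = 3 := by decide
      rw [h7, h3]
    · rw [if_neg hz, if_neg (by omega : ¬ PySem.Int.mod n 100 ≠ 0)]
      have h7 : PySem.Str.len "hundred" = 7 := by decide
      have he : PySem.Str.len "" = 0 := by decide
      rw [h7, he]

def pvLB (n : Int) : Int :=
  if n < 1000 then pvSmall 2 n
  else pvSmall 2 (PySem.Int.floordiv n 1000) + 8 +
    (if 0 < PySem.Int.mod n 1000 ∧ PySem.Int.mod n 1000 < 100 then 3 else 0) +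
    pvSmall 2 (PySem.Int.mod n 1000)

theorem pvLenLB (n : Int) (h0 : 1 ≤ n) (h : n < 1000000) :
    PySem.Str.len (pvIntToWords 3 n) = pvLB n := by
  by_cases hk : n < 1000
  · rw [show (3 : Nat) = 1 + 2 from rfl, pvWords_fuel2 1 n hk, pvLen1000 n (by omega) hk,
        pvLB, if_pos hk]
  · have hmn : 0 ≤ PySem.Int.mod n 1000 := PySem.Int.mod_nonneg n (by norm_num)
    have hml : PySem.Int.mod n 1000 < 1000 := PySem.Int.mod_lt n (by norm_num)
    have hq1 : 1 ≤ PySem.Int.floordiv n 1000 := (PySem.Int.le_floordiv_iff_mul_le (by norm_num)).mpr (by omega)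
    have hq9 : PySem.Int.floordiv n 1000 < 1000 := (PySem.Int.floordiv_lt_iff_lt_mul (by norm_num)).mpr (by omega)
    rw [show (3 : Nat) = 2 + 1 from rfl, pvWords_succ]
    rw [pvContains_digits n (by omega), pvContains_teens n (by omega)]
    simp only [Bool.false_eq_true, if_false]
    rw [if_neg (by omega : ¬ n < 100), if_neg (by omega : ¬ n < 1000), if_pos h]
    rw [PySem.Str.len_append, PySem.Str.len_append, PySem.Str.len_append]
    rw [pvLen1000 _ (by omega) hq9, pvLen1000 _ hmn hml]
    rw [pvLB, if_neg (by omega : ¬ n < 1000)]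
    have h8 : PySem.Str.len "thousand" = 8 := by decide
    rw [h8]
    by_cases hz : 0 < PySem.Int.mod n 1000 ∧ PySem.Int.mod n 1000 < 100
    · rw [if_pos hz, if_pos hz, show PySem.Str.len "and" = 3 from by decide]
    · rw [if_neg hz, if_neg hz, show PySem.Str.len "" = 0 from by decide]

def pvS : Nat → Int
  | 0 => 0
  | m + 1 => pvS m + pvLB ((m : Int) + 1)

def pvPref : Nat → Int
  | 0 => 0
  | j + 1 => pvPref j + pvSmall 2 ((j : Int) + 1)

theorem pvA_eq_S (m : Nat) (h : m ≤ 999999) :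
    (PySem.List.pyRange 1 ((m : Int) + 1) 1).foldl
      (fun acc n => acc + PySem.Str.len (pvIntToWords 3 n)) 0 = pvS m := by
  induction m with
  | zero =>
    rw [show ((0 : Nat) : Int) + 1 = 1 from by norm_num]
    rw [PySem.List.pyRange_one]
    norm_num [pvS]
  | succ k ih =>
    have hk : k ≤ 999999 := by omega
    have hc : (((k + 1 : Nat)) : Int) + 1 = ((k : Int) + 1) + 1 := by push_cast; ring
    have hstep : PySem.List.pyRange 1 (((k : Int) + 1) + 1) 1
        = PySem.List.pyRange 1 ((k : Int) + 1) 1 ++ [(k : Int) + 1] :=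
      PySem.List.pyRange_one_succ_right (by omega)
    rw [hc, hstep, List.foldl_append, ih hk]
    show pvS k + PySem.Str.len (pvIntToWords 3 ((k : Int) + 1)) = pvS (k + 1)
    rw [pvLenLB _ (by omega) (by push_cast; omega)]
    rfl

theorem pvGetLast (xs : List Int) (h : xs ≠ []) :
    PySem.List.pyGetD xs (-1) 0 = xs.getLast h := by
  have hl : 0 < xs.length := List.length_pos_iff.mpr h
  simp only [PySem.List.pyGetD, PySem.List.pyGet?, PySem.List.pyIdx?]
  rw [if_neg (by norm_num), if_pos (by omega : -(xs.length : Int) ≤ -1)]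
  simp only [Option.bind_some, show ((-(-1 : Int)).toNat) = 1 from rfl]
  rw [List.getLast_eq_getElem]
  rw [List.getElem?_eq_getElem (by omega)]
  rfl

theorem pvP_char (m : Nat) (h : 1 ≤ m) :
    (PySem.List.pyRange 1 (m : Int) 1).foldl
      (fun P j => P ++ [PySem.List.pyGetD P (-1) 0 + pvSmall 2 j]) [0]
    = (List.range m).map pvPref := by
  induction m with
  | zero => omega
  | succ k ih =>
    by_cases hk : k = 0
    · subst hk
      show (PySem.List.pyRange 1 1 1).foldl _ [0] = _
      rw [PySem.List.pyRange_one]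
      norm_num [List.range_succ]
      rfl
    · have hk1 : 1 ≤ k := by omega
      have hc : ((k + 1 : Nat) : Int) = (k : Int) + 1 := by push_cast; ring
      have hstep : PySem.List.pyRange 1 ((k : Int) + 1) 1
          = PySem.List.pyRange 1 (k : Int) 1 ++ [(k : Int)] :=
        PySem.List.pyRange_one_succ_right (by omega)
      rw [hc, hstep, List.foldl_append, ih hk1]
      have hne : (List.range k).map pvPref ≠ [] := by
        simp [List.map_eq_nil_iff, List.range_eq_nil]; omega
      show (List.range k).map pvPref ++ [PySem.List.pyGetD ((List.range k).map pvPref) (-1) 0 + pvSmall 2 (k : Int)] = _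
      rw [pvGetLast _ hne]
      rw [List.getLast_eq_getElem]
      have hlen : ((List.range k).map pvPref).length = k := by simp
      rw [List.range_succ, List.map_append]
      congr 1
      simp only [List.map_cons, List.map_nil]
      congr 1
      have : ((List.range k).map pvPref)[((List.range k).map pvPref).length - 1] = pvPref (k - 1) := by
        simp only [hlen]
        rw [List.getElem_map, List.getElem_range]
      rw [this]
      have hp : pvPref k = pvPref (k - 1) + pvSmall 2 (((k - 1 : Nat) : Int) + 1) := by
        conv_lhs => rw [show k = (k - 1) + 1 from by omega]
        rfl
      rw [hp]
      congr 2
      omega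

theorem pvPref_eq_S (j : Nat) (h : j ≤ 999) : pvPref j = pvS j := by
  induction j with
  | zero => rfl
  | succ k ih =>
    show pvPref k + pvSmall 2 ((k : Int) + 1) = pvS k + pvLB ((k : Int) + 1)
    rw [ih (by omega), pvLB, if_pos (by push_cast; omega : ((k : Int) + 1) < 1000)]

theorem pvLB_block (q r : Nat) (h1 : 1 ≤ q) (h2 : q ≤ 999) (h3 : r ≤ 999) :
    pvLB ((1000 * q + r : Nat) : Int) =
      pvSmall 2 (q : Int) + 8 + (if 0 < (r : Int) ∧ (r : Int) < 100 then 3 else 0) + pvSmall 2 (r : Int) := by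
  have hfd : PySem.Int.floordiv ((1000 * q + r : Nat) : Int) 1000 = ((q : Nat) : Int) := by
    have := PySem.Int.floordiv_natCast (1000 * q + r) 1000
    rw [show (((1000 : Nat)) : Int) = 1000 from by norm_num] at this
    rw [this]
    congr 1
    omega
  have hmd : PySem.Int.mod ((1000 * q + r : Nat) : Int) 1000 = ((r : Nat) : Int) := by
    have := PySem.Int.mod_natCast (1000 * q + r) 1000
    rw [show (((1000 : Nat)) : Int) = 1000 from by norm_num] at this
    rw [this]
    congr 1
    omega
  rw [pvLB, if_neg (by push_cast; omega : ¬ ((1000 * q + r : Nat) : Int) < 1000), hfd, hmd]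

theorem pvGr (q r : Nat) (h1 : 1 ≤ q) (h2 : q ≤ 999) (h3 : r ≤ 999) :
    pvS (1000 * q + r) = pvS (1000 * q) + (r : Int) * (pvSmall 2 (q : Int) + 8)
      + 3 * min (r : Int) 99 + pvPref r := by
  induction r with
  | zero => norm_num [pvPref]
  | succ k ih =>
    have hk : k ≤ 999 := by omega
    have hstep : pvS (1000 * q + (k + 1)) = pvS (1000 * q + k) + pvLB (((1000 * q + k : Nat) : Int) + 1) := by
      rfl
    rw [hstep, ih hk]
    have hcast : ((1000 * q + k : Nat) : Int) + 1 = ((1000 * q + (k + 1) : Nat) : Int) := by push_cast; ring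
    rw [hcast, pvLB_block q (k + 1) h1 h2 h3]
    have hpref : pvPref (k + 1) = pvPref k + pvSmall 2 ((k : Int) + 1) := rfl
    rw [hpref]
    have hsc : ((k + 1 : Nat) : Int) = (k : Int) + 1 := by push_cast; ring
    rw [hsc]
    by_cases hsmall : (k : Int) + 1 < 100
    · rw [if_pos (by constructor <;> omega), show min ((k : Int) + 1) 99 = (k : Int) + 1 from by omega,
          show min (k : Int) 99 = (k : Int) from by omega]
      ring
    · rw [if_neg (by omega), show min ((k : Int) + 1) 99 = 99 from by omega,
          show min (k : Int) 99 = 99 from by omega]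
      ring

theorem pvG0 (q : Nat) (h1 : 1 ≤ q) (h2 : q ≤ 999) :
    pvS (1000 * q) = pvPref 999 + 1000 * pvPref (q - 1)
      + ((q : Int) - 1) * (8297 + pvPref 999) + (pvSmall 2 (q : Int) + 8) := by
  induction q with
  | zero => omega
  | succ k ih =>
    by_cases hk0 : k = 0
    · subst hk0
      have h1000 : pvS (1000 * 1) = pvS 999 + pvLB (((999 : Nat) : Int) + 1) := rfl
      have hLB : pvLB (((999 : Nat) : Int) + 1) = 11 := by decide
      have hp0 : pvPref 0 = 0 := rfl
      have hs1 : pvSmall 2 (((1 : Nat)) : Int) = 3 := by decide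
      rw [h1000, ← pvPref_eq_S 999 (by norm_num), hLB, hp0, hs1]
      push_cast
      ring
    · obtain ⟨k', rfl⟩ : ∃ k', k = k' + 1 := ⟨k - 1, by omega⟩
      have hk1 : 1 ≤ k' + 1 := by omega
      have hk9 : k' + 1 ≤ 999 := by omega
      have hstep : pvS (1000 * (k' + 1 + 1)) = pvS (1000 * (k' + 1) + 999) + pvLB (((1000 * (k' + 1) + 999 : Nat) : Int) + 1) := rfl
      have hcast : ((1000 * (k' + 1) + 999 : Nat) : Int) + 1 = ((1000 * (k' + 1 + 1) + 0 : Nat) : Int) := by push_cast; ring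
      rw [hstep, hcast, pvLB_block (k' + 1 + 1) 0 (by omega) (by omega) (by omega)]
      rw [pvGr (k' + 1) 999 hk1 hk9 (by norm_num), ih hk1 hk9]
      have hq : pvPref (k' + 1) = pvPref k' + pvSmall 2 ((k' : Int) + 1) := rfl
      have hsmall0 : pvSmall 2 ((0 : Nat) : Int) = 0 := by decide
      rw [hsmall0, show ((k' + 1 + 1 : Nat) - 1) = k' + 1 from by omega,
          show ((k' + 1 : Nat) - 1) = k' from by omega, hq]
      rw [if_neg (by norm_num), show min ((999 : Nat) : Int) 99 = 99 from by norm_num]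
      push_cast
      ring

theorem pvAlt_P : (PySem.List.pyRange 1 1000 1).foldl
    (fun P j => P ++ [PySem.List.pyGetD P (-1) 0 + pvSmall 2 j]) [0]
    = (List.range 1000).map pvPref := by
  have := pvP_char 1000 (by norm_num)
  exact_mod_cast this

theorem pvPget (k : Int) (h0 : 0 ≤ k) (h : k < 1000) :
    PySem.List.pyGetD ((List.range 1000).map pvPref) k 0 = pvPref k.toNat := by
  rw [PySem.List.pyGetD_eq_getElem _ _ h0 (by simp; omega)]
  rw [List.getElem_map, List.getElem_range]

-- ===== VERDICT (by name: the statement is the Claim_ definition above) =====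
theorem problem_17_spec : Claim_equal_problem_17 := by
  intro N _ hpre
  have hpre' : N < 1000000 := hpre
  show problem_17 N = problem_17_alt N
  rw [problem_17, problem_17_alt]
  simp only [pvAlt_P]
  by_cases hN : N ≤ 0
  · rw [if_pos hN, PySem.List.pyRange_one]
    rw [show (N + 1 - 1).toNat = 0 from by omega]
    simp
  · obtain ⟨m, rfl⟩ : ∃ m : Nat, N = (m : Int) := ⟨N.toNat, by omega⟩
    have hm1 : 1 ≤ m := by omega
    rw [pvA_eq_S m (by exact_mod_cast by omega : m ≤ 999999)]
    rw [if_neg hN]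
    by_cases hlt : (m : Int) < 1000
    · rw [if_pos hlt, pvPget _ (by omega) hlt, Int.toNat_natCast]
      exact (pvPref_eq_S m (by omega)).symm
    · rw [if_neg hlt]
      have hfd : PySem.Int.floordiv ((m : Nat) : Int) 1000 = ((m / 1000 : Nat) : Int) := by
        have := PySem.Int.floordiv_natCast m 1000
        rw [show (((1000 : Nat)) : Int) = 1000 from by norm_num] at this
        exact this
      have hmd : PySem.Int.mod ((m : Nat) : Int) 1000 = ((m % 1000 : Nat) : Int) := by
        have := PySem.Int.mod_natCast m 1000
        rw [show (((1000 : Nat)) : Int) = 1000 from by norm_num] at this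
        exact this
      have hq1 : 1 ≤ m / 1000 := by omega
      have hq9 : m / 1000 ≤ 999 := by omega
      have hr9 : m % 1000 ≤ 999 := by omega
      have hm : m = 1000 * (m / 1000) + m % 1000 := by omega
      rw [hfd, hmd]
      rw [show ((m / 1000 : Nat) : Int) - 1 = ((m / 1000 - 1 : Nat) : Int) from by omega]
      rw [pvPget 999 (by norm_num) (by norm_num),
          pvPget ((m / 1000 - 1 : Nat) : Int) (by omega) (by omega),
          pvPget ((m % 1000 : Nat) : Int) (by omega) (by omega)]
      rw [Int.toNat_natCast, Int.toNat_natCast, show (999 : Int).toNat = 999 from rfl]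
      generalize hqd : m / 1000 = qn at hq1 hq9 hm ⊢
      generalize hrd : m % 1000 = rn at hr9 hm ⊢
      rw [hm, pvGr qn rn hq1 hq9 hr9, pvG0 qn hq1 hq9]
      obtain ⟨q', rfl⟩ : ∃ q', qn = q' + 1 := ⟨qn - 1, by omega⟩
      rw [show (q' + 1 - 1 : Nat) = q' from rfl]
      push_cast
      ring
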